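-- pv_equiv track=rewrite | github.com/OumaCavin/jac-interactive-learning-platform | backend/apps/jac_execution/services/translator.py | validate_jac_syntax
-- ===== SOURCE A (Python) =====
-- from typing import Dict, List, Tuple, Optional
--
-- def validate_jac_syntax(jac_code: str) -> List[str]:
--     """Validate JAC code syntax and return list of errors."""
--     errors = []
--     lines = jac_code.split('\n')
--
--     for i, line in enumerate(lines, 1):
--         stripped = line.strip()
--         if not stripped or stripped.startswith('//'):
--             continue
--
--         # Basic syntax checks
--         if stripped.endswith('->') and i == len(lines):
--             errors.append(f"Line {i}: Block statement '{stripped}' missing body")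
--
--         if stripped == 'else ->' and i == len(lines):
--             errors.append(f"Line {i}: 'else' block missing body")
--
--         # Check for proper JAC keywords
--         valid_statements = ['var', 'can', 'if', 'else', 'for', 'while', 'return', 'print']
--         if stripped.split()[0] not in valid_statements and not stripped.startswith('//'):
--             # Could be a variable assignment or function call
--             pass
--
--     return errors
-- ===== SOURCE B (Python) =====
-- def validate_jac_syntax(jac_code):
--     """Validate JAC code syntax and return list of errors.
--
--     Only the last line can produce an error (every append in the original is
--     gated on i == len(lines)), so inspect just the last line; no loop."""
--     lines = jac_code.split('\n')
--     n = len(lines)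
--     last = lines[-1].strip()
--     errors = []
--     if last and not last.startswith('//'):
--         if last.endswith('->'):
--             errors.append(f"Line {n}: Block statement '{last}' missing body")
--         if last == 'else ->':
--             errors.append(f"Line {n}: 'else' block missing body")
--     return errors
-- ===== Notes on version B (the rewrite author's own statement) =====
-- stated objective: simpler
-- what changed: Drops the whole loop: every append in A is gated on i == len(lines), so B inspects only the last line (lines[-1]) and builds the error list directly.
import Mathlib
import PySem

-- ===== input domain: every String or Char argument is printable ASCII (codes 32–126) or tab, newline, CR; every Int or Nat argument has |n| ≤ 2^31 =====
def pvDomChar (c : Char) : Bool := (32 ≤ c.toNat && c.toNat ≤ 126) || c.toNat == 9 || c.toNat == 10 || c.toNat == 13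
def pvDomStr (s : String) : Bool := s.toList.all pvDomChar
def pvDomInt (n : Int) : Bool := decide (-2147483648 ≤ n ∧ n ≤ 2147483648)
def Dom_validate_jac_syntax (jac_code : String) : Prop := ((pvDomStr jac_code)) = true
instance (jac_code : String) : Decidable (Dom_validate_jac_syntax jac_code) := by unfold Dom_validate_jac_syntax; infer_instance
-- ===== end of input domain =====

-- B drops A's loop: every append in A is gated on i == len(lines), so only the
-- last line matters; B inspects lines[-1] directly (objective: simpler).

-- ===== PORT A =====
-- the loop body of A, for line p.2 at 1-based index p.1, with n = len(lines)
def pvAStep (n : Int) (errors : List String) (p : Int × String) : List String :=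
  let stripped := PySem.Str.strip p.2
  if stripped == "" || PySem.Str.startswith stripped "//" then errors
  else
    let e1 := if PySem.Str.endswith stripped "->" && p.1 == n then
        errors ++ ["Line " ++ PySem.Int.toStr p.1 ++ ": Block statement '" ++ stripped ++ "' missing body"]
      else errors
    -- (A's valid_statements check only executes 'pass'; no state change to port)
    if stripped == "else ->" && p.1 == n then
      e1 ++ ["Line " ++ PySem.Int.toStr p.1 ++ ": 'else' block missing body"]
    else e1

def validate_jac_syntax (jac_code : String) : List String :=
  let lines := (PySem.Str.split? jac_code "\n").getD []   -- sep "\n" ≠ "", so split? is always some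
  (PySem.List.enumerate lines 1).foldl (pvAStep (PySem.List.len lines)) []

-- ===== PORT B =====
def validate_jac_syntax_alt (jac_code : String) : List String :=
  let lines := (PySem.Str.split? jac_code "\n").getD []   -- sep "\n" ≠ "", so split? is always some
  let n := PySem.List.len lines
  -- lines[-1]: split never returns an empty list, so the IndexError default "" is unreachable
  let last := PySem.Str.strip (PySem.List.pyGetD lines (-1) "")
  if last == "" || PySem.Str.startswith last "//" then []
  else
    (if PySem.Str.endswith last "->" then
        ["Line " ++ PySem.Int.toStr n ++ ": Block statement '" ++ last ++ "' missing body"]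
      else []) ++
    (if last == "else ->" then
        ["Line " ++ PySem.Int.toStr n ++ ": 'else' block missing body"]
      else [])

-- ===== PRECONDITION & SPEC =====
def Spec_validate_jac_syntax (jac_code : String) (out : List String) : Prop := out = validate_jac_syntax_alt jac_code
instance (jac_code : String) (out : List String) : Decidable (Spec_validate_jac_syntax jac_code out) := by unfold Spec_validate_jac_syntax; infer_instance

-- ===== CLAIM (what is proved, stated in full; the proofs are below) =====
def Claim_equal_validate_jac_syntax : Prop := ∀ (jac_code : String), Dom_validate_jac_syntax jac_code → Spec_validate_jac_syntax jac_code (validate_jac_syntax jac_code)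

-- ===== LEMMAS AND PROOFS =====

-- A's loop body does nothing at an index other than n
lemma pvAStep_of_ne (n : Int) (errors : List String) (p : Int × String) (h : p.1 ≠ n) :
    pvAStep n errors p = errors := by
  unfold pvAStep
  simp [h]

-- hence the fold over the non-final lines is the identity
lemma pvFoldl_skip (n : Int) (ps : List (Int × String)) (acc : List String)
    (h : ∀ p ∈ ps, p.1 ≠ n) : ps.foldl (pvAStep n) acc = acc := by
  induction ps generalizing acc with
  | nil => rfl
  | cons q qs ih =>
      simp only [List.foldl_cons]
      rw [pvAStep_of_ne n acc q (h q (List.mem_cons_self))]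
      exact ih acc (fun p hp => h p (List.mem_cons_of_mem q hp))

-- the core equality, for any list of lines
lemma pvMain (lines : List String) :
    (PySem.List.enumerate lines 1).foldl (pvAStep (PySem.List.len lines)) [] =
    (let n := PySem.List.len lines
     let last := PySem.Str.strip (PySem.List.pyGetD lines (-1) "")
     if last == "" || PySem.Str.startswith last "//" then []
     else
       (if PySem.Str.endswith last "->" then
           ["Line " ++ PySem.Int.toStr n ++ ": Block statement '" ++ last ++ "' missing body"]
         else []) ++
       (if last == "else ->" then
           ["Line " ++ PySem.Int.toStr n ++ ": 'else' block missing body"]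
         else [])) := by
  rcases List.eq_nil_or_concat lines with rfl | ⟨L, b, rfl⟩
  · decide
  · rw [List.concat_eq_append]
    have hlen : PySem.List.len (L ++ [b]) = (L.length : Int) + 1 := by
      simp [PySem.List.len_eq]
    have hlast : PySem.List.pyGetD (L ++ [b]) (-1) "" = b := by
      rw [PySem.List.pyGetD_neg_ofNat (L ++ [b]) 1 "" (by omega)
        (by simp)]
      simp
    rw [PySem.List.enumerate_append, List.foldl_append, hlen, hlast]
    rw [pvFoldl_skip ((L.length : Int) + 1) _ [] (by
      intro p hp
      rw [PySem.List.mem_enumerate_iff] at hp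
      obtain ⟨k, hk, rfl⟩ := hp
      simp only []
      omega)]
    simp only [PySem.List.enumerate_cons, PySem.List.enumerate_nil, List.foldl_cons,
      List.foldl_nil]
    have hidx : (1 : Int) + (L.length : Int) = (L.length : Int) + 1 := by omega
    rw [hidx]
    simp only [pvAStep, beq_self_eq_true, Bool.and_true]
    split_ifs <;> simp

-- ===== VERDICT (by name: the statement is the Claim_ definition above) =====
theorem validate_jac_syntax_spec : Claim_equal_validate_jac_syntax := by
  intro jac_code _
  unfold Spec_validate_jac_syntax validate_jac_syntax validate_jac_syntax_alt
  exact pvMain _
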